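-- pv_equiv track=rewrite | github.com/camAtGitHub/kafka-time-lag-monitor | src/interpolation.py | aggregate_partition_lags
-- ===== SOURCE A (Python) =====
-- from typing import List, Tuple, Optional
--
-- def aggregate_partition_lags(
--     partition_lag_list: List[Tuple[int, int, str]]
-- ) -> Tuple[int, Optional[int], str]:
--     """Aggregate lag information across multiple partitions.
--
--     Args:
--         partition_lag_list: List of (partition, lag_seconds, method) tuples
--
--     Returns:
--         Tuple of (max_lag_seconds, worst_partition, method_of_worst)
--         If all lags are 0, worst_partition is None and method is "current"
--     """
--     if not partition_lag_list:
--         return (0, None, "current")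
--
--     # Find max lag
--     max_lag = max(lag for _, lag, _ in partition_lag_list)
--
--     # If all lags are 0
--     if max_lag == 0:
--         return (0, None, "current")
--
--     # Find the worst partition (first one with max lag)
--     worst_partition = None
--     worst_method = "current"
--
--     for partition, lag, method in partition_lag_list:
--         if lag == max_lag:
--             worst_partition = partition
--             worst_method = method
--             break
--
--     return (max_lag, worst_partition, worst_method)
-- ===== SOURCE B (Python) =====
-- from typing import List, Tuple, Optional
--
-- def aggregate_partition_lags(
--     partition_lag_list: List[Tuple[int, int, str]]
-- ) -> Tuple[int, Optional[int], str]: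
--     # One pass: keep a running maximum and the first entry achieving it.
--     current_max = None
--     worst_partition = None
--     worst_method = "current"
--     for partition, lag, method in partition_lag_list:
--         if current_max is None or lag > current_max:
--             current_max = lag
--             worst_partition = partition
--             worst_method = method
--     if current_max is None or current_max == 0:
--         return (0, None, "current")
--     return (current_max, worst_partition, worst_method)
-- ===== Notes on version B (the rewrite author's own statement) =====
-- stated objective: simpler
-- what changed: Replaces A's two passes (max() over all lags, then a second scan for the first partition attaining it) with a single loop that maintains a running maximum and the first entry achieving it (strict > keeps the first occurrence).
import Mathlib
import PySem

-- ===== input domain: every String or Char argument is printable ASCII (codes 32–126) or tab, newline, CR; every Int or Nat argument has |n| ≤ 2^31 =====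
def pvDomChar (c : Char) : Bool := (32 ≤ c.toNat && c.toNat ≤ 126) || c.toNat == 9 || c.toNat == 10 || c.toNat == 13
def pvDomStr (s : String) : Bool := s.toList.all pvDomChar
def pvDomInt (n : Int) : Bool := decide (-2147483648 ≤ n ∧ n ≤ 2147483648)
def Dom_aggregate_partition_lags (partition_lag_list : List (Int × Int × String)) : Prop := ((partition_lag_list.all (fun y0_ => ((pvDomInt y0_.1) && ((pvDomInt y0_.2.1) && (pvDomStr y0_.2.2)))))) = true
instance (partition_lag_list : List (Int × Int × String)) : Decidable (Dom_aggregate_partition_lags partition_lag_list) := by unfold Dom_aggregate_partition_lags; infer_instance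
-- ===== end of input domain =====

-- B fuses A's two passes (max over lags, then scan for the first attainer) into one
-- running-best loop; same return value, slightly simpler single traversal.


-- ===== PORT A =====
-- A's `for … if lag == max_lag: …; break` loop: first entry with lag = m, else the loop's defaults
def aggAFind (m : Int) : List (Int × Int × String) → Option Int × String
  | [] => (none, "current")
  | x :: rest => if x.2.1 = m then (some x.1, x.2.2) else aggAFind m rest

def aggregate_partition_lags (partition_lag_list : List (Int × Int × String)) : Int × Option Int × String :=
  match partition_lag_list with
  | [] => (0, none, "current")
  | hd :: tl =>
    -- max(lag for _, lag, _ in partition_lag_list) on the nonempty list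
    let max_lag := tl.foldl (fun a x => max a x.2.1) hd.2.1
    if max_lag = 0 then (0, none, "current")
    else
      let ws := aggAFind max_lag (hd :: tl)
      (max_lag, ws.1, ws.2)

-- ===== PORT B =====
def aggBStep (s : Option Int × Option Int × String) (x : Int × Int × String) :
    Option Int × Option Int × String :=
  match s.1 with
  | none => (some x.2.1, some x.1, x.2.2)
  | some c => if x.2.1 > c then (some x.2.1, some x.1, x.2.2) else s

def aggregate_partition_lags_alt (partition_lag_list : List (Int × Int × String)) : Int × Option Int × String :=
  let s := partition_lag_list.foldl aggBStep (none, none, "current")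
  match s.1 with
  | none => (0, none, "current")
  | some c => if c = 0 then (0, none, "current") else (c, s.2.1, s.2.2)

-- ===== PRECONDITION & SPEC =====
def Spec_aggregate_partition_lags (partition_lag_list : List (Int × Int × String)) (out : Int × Option Int × String) : Prop := out = aggregate_partition_lags_alt partition_lag_list
instance (partition_lag_list : List (Int × Int × String)) (out : Int × Option Int × String) : Decidable (Spec_aggregate_partition_lags partition_lag_list out) := by unfold Spec_aggregate_partition_lags; infer_instance

-- ===== CLAIM (what is proved, stated in full; the proofs are below) =====
def Claim_equal_aggregate_partition_lags : Prop := ∀ (partition_lag_list : List (Int × Int × String)), Dom_aggregate_partition_lags partition_lag_list → Spec_aggregate_partition_lags partition_lag_list (aggregate_partition_lags partition_lag_list)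

-- ===== LEMMAS AND PROOFS =====

theorem le_foldl_max (l : List (Int × Int × String)) (c : Int) :
    c ≤ l.foldl (fun a x => max a x.2.1) c := by
  induction l generalizing c with
  | nil => simp
  | cons x rest ih =>
    simp only [List.foldl]
    exact le_trans (le_max_left _ _) (ih _)

-- B's loop after it has seen a prefix with running max c held by entry (p, m):
-- it returns the overall max, keeping (p, m) unless the tail strictly exceeds c,
-- in which case it keeps the first tail entry attaining the overall max.
theorem bfold_some (l : List (Int × Int × String)) (c : Int) (p : Int) (m : String) :
    l.foldl aggBStep (some c, some p, m) =
      (some (l.foldl (fun a x => max a x.2.1) c),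
       if l.foldl (fun a x => max a x.2.1) c = c then (some p, m)
       else aggAFind (l.foldl (fun a x => max a x.2.1) c) l) := by
  induction l generalizing c p m with
  | nil => simp
  | cons x rest ih =>
    simp only [List.foldl, aggBStep]
    by_cases hgt : x.2.1 > c
    · simp only [if_pos hgt]
      rw [ih]
      have hmx : max c x.2.1 = x.2.1 := max_eq_right (le_of_lt hgt)
      rw [hmx]
      have hge : x.2.1 ≤ rest.foldl (fun a x => max a x.2.1) x.2.1 := le_foldl_max _ _
      have hne : rest.foldl (fun a x => max a x.2.1) x.2.1 ≠ c := by omega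
      simp only [aggAFind, hne]
      by_cases hx : rest.foldl (fun a x => max a x.2.1) x.2.1 = x.2.1
      · simp [hx]
      · have : ¬ x.2.1 = rest.foldl (fun a x => max a x.2.1) x.2.1 := fun h => hx h.symm
        simp [hx, this]
    · simp only [if_neg hgt]
      rw [ih]
      have hmx : max c x.2.1 = c := max_eq_left (by omega)
      rw [hmx]
      by_cases hc : rest.foldl (fun a x => max a x.2.1) c = c
      · simp [hc]
      · have hge : c ≤ rest.foldl (fun a x => max a x.2.1) c := le_foldl_max _ _
        have hxne : ¬ x.2.1 = rest.foldl (fun a x => max a x.2.1) c := by omega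
        simp [hc, aggAFind, hxne]

-- ===== VERDICT (by name: the statement is the Claim_ definition above) =====
theorem aggregate_partition_lags_spec : Claim_equal_aggregate_partition_lags := by
  intro l _
  unfold Spec_aggregate_partition_lags aggregate_partition_lags aggregate_partition_lags_alt
  match l with
  | [] => rfl
  | hd :: tl =>
    simp only [List.foldl, aggBStep, bfold_some]
    by_cases h0 : tl.foldl (fun a x => max a x.2.1) hd.2.1 = 0
    · simp [h0]
    · by_cases heq : tl.foldl (fun a x => max a x.2.1) hd.2.1 = hd.2.1
      · rw [heq] at h0 ⊢
        simp [h0, aggAFind]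
      · have : ¬ hd.2.1 = tl.foldl (fun a x => max a x.2.1) hd.2.1 := fun h => heq h.symm
        simp [heq, h0, aggAFind, this]
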